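-- pv_equiv track=rewrite | github.com/AntonioAltea/my-web | scripts/media_sync_index.py | sync_plan
-- ===== SOURCE A (Python) =====
-- def sync_plan(local_files: dict[str, int], remote_files: dict[str, int]) -> tuple[list[str], list[str]]:
--     upload_names = sorted(
--         name for name, size in local_files.items()
--         if remote_files.get(name) != size
--     )
--     delete_names = sorted(
--         name for name in remote_files
--         if name not in local_files
--     )
--     return upload_names, delete_names
-- ===== SOURCE B (Python) =====
-- def sync_plan(local_files: dict[str, int], remote_files: dict[str, int]) -> tuple[list[str], list[str]]:
--     upload_names, delete_names = [], []
--     for name in sorted(set(local_files) | set(remote_files)):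
--         if name in local_files:
--             if local_files[name] != remote_files.get(name):
--                 upload_names.append(name)
--         elif name in remote_files:
--             delete_names.append(name)
--     return upload_names, delete_names
-- ===== Notes on version B (the rewrite author's own statement) =====
-- stated objective: alternative
-- what changed: Replaces A's two independent sorted comprehensions by a single ordered pass over the sorted union of both key sets, classifying each name into upload/delete as it goes (the outputs are sorted because the traversal is).
import Mathlib
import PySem

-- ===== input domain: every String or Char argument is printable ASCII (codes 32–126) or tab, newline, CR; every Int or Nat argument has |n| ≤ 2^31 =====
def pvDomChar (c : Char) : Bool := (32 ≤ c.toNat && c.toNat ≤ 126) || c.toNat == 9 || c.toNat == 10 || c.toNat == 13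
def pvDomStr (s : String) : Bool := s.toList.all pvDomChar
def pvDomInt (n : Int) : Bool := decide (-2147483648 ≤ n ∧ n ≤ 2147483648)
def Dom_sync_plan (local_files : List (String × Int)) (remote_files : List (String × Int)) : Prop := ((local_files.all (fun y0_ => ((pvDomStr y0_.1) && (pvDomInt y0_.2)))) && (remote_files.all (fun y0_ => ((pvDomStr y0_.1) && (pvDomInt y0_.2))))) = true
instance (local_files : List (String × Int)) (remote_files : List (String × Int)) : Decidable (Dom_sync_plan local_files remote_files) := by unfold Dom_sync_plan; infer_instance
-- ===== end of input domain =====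

-- B replaces A's two independent sorted comprehensions by one ordered pass over the
-- sorted union of the key sets (objective: alternative decomposition).

-- dict.get(name) / dict[name] on an association list: first matching value (shared helper)
def dget (d : List (String × Int)) (n : String) : Option Int :=
  (d.find? (fun p => p.1 == n)).map Prod.snd

-- ===== PORT A =====
def sync_plan (local_files : List (String × Int)) (remote_files : List (String × Int)) : List String × List String :=
  -- upload_names = sorted(name for name, size in local_files.items() if remote_files.get(name) != size)
  let upload_names :=
    PySem.List.sorted
      ((local_files.filter (fun p => decide (dget remote_files p.1 ≠ some p.2))).map Prod.fst)
      (fun x => x) false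
  -- delete_names = sorted(name for name in remote_files if name not in local_files)
  let delete_names :=
    PySem.List.sorted
      ((remote_files.filter (fun p => !(local_files.map Prod.fst).contains p.1)).map Prod.fst)
      (fun x => x) false
  (upload_names, delete_names)

-- ===== PORT B =====
def sync_plan_alt (local_files : List (String × Int)) (remote_files : List (String × Int)) : List String × List String :=
  -- for name in sorted(set(local_files) | set(remote_files)): classify
  let keys :=
    PySem.List.sorted
      (PySem.Set.ofList (local_files.map Prod.fst ++ remote_files.map Prod.fst))
      (fun x => x) false
  keys.foldl (fun acc name =>
    if (local_files.map Prod.fst).contains name then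
      -- local_files[name] != remote_files.get(name): name is a local key, so
      -- dget local_files name = some (local_files[name]), and some v ≠ none (int != None) — exact
      if dget local_files name ≠ dget remote_files name then (acc.1 ++ [name], acc.2) else acc
    else if (remote_files.map Prod.fst).contains name then (acc.1, acc.2 ++ [name])
    else acc) ([], [])

-- ===== PRECONDITION & SPEC =====
-- Pre_ requires pairwise-distinct keys in each association list: the Python arguments are
-- dicts, whose keys are necessarily distinct, so an association list with a duplicated key
-- encodes no Python input of this function.
def Pre_sync_plan (local_files : List (String × Int)) (remote_files : List (String × Int)) : Prop :=
  (local_files.map Prod.fst).Nodup ∧ (remote_files.map Prod.fst).Nodup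
instance (local_files : List (String × Int)) (remote_files : List (String × Int)) : Decidable (Pre_sync_plan local_files remote_files) := by unfold Pre_sync_plan; infer_instance
def pvWitness_sync_plan : (List (String × Int)) × (List (String × Int)) :=
  ([("a", 1), ("b", 2)], [("b", 3), ("c", 4)])

def Spec_sync_plan (local_files : List (String × Int)) (remote_files : List (String × Int)) (out : List String × List String) : Prop := out = sync_plan_alt local_files remote_files
instance (local_files : List (String × Int)) (remote_files : List (String × Int)) (out : List String × List String) : Decidable (Spec_sync_plan local_files remote_files out) := by unfold Spec_sync_plan; infer_instance

-- ===== CLAIM (what is proved, stated in full; the proofs are below) =====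
def Claim_equal_sync_plan : Prop := ∀ (local_files : List (String × Int)) (remote_files : List (String × Int)), Dom_sync_plan local_files remote_files → Pre_sync_plan local_files remote_files → Spec_sync_plan local_files remote_files (sync_plan local_files remote_files)

-- ===== LEMMAS AND PROOFS =====

-- dget on a list with distinct keys returns exactly the stored value
theorem dget_eq_some_of_mem (d : List (String × Int)) (n : String) (s : Int)
    (hnd : (d.map Prod.fst).Nodup) (hm : (n, s) ∈ d) : dget d n = some s := by
  induction d with
  | nil => cases hm
  | cons p rest ih =>
    simp only [List.map_cons, List.nodup_cons] at hnd
    rcases List.mem_cons.mp hm with h | h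
    · subst h; simp [dget]
    · have hne : p.1 ≠ n := by
        intro he; exact hnd.1 (he ▸ (List.mem_map.mpr ⟨(n, s), h, rfl⟩))
      have hb : (p.1 == n) = false := beq_eq_false_iff_ne.mpr hne
      simp only [dget] at ih ⊢
      rw [List.find?_cons_of_neg (by simp [hne])]
      exact ih hnd.2 h

theorem mem_of_dget_eq_some (d : List (String × Int)) (n : String) (s : Int)
    (h : dget d n = some s) : (n, s) ∈ d := by
  induction d with
  | nil => simp [dget] at h
  | cons p rest ih =>
    by_cases he : p.1 = n
    · simp only [dget, List.find?, he] at h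
      simp only [beq_self_eq_true, cond_true, Option.map_some, Option.some.injEq] at h
      exact List.mem_cons.mpr (Or.inl (by cases p; simp_all))
    · simp only [dget, List.find?] at h
      rw [show (p.1 == n) = false from beq_eq_false_iff_ne.mpr he] at h
      exact List.mem_cons.mpr (Or.inr (ih h))

theorem mem_keys_iff_dget (d : List (String × Int)) (n : String) :
    n ∈ d.map Prod.fst ↔ ∃ s, dget d n = some s := by
  constructor
  · intro h
    rcases List.mem_map.mp h with ⟨p, hp, hfst⟩
    induction d with
    | nil => cases hp
    | cons q rest ih =>
      by_cases he : q.1 = n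
      · exact ⟨q.2, by simp [dget, List.find?, he]⟩
      · rcases List.mem_cons.mp hp with h1 | h1
        · exact absurd (h1 ▸ hfst) he
        · rcases ih (List.mem_map.mpr ⟨p, h1, hfst⟩) h1 with ⟨s, hs⟩
          refine ⟨s, ?_⟩
          simpa [dget, List.find?, beq_eq_false_iff_ne.mpr he] using hs
  · rintro ⟨s, hs⟩
    exact List.mem_map.mpr ⟨(n, s), mem_of_dget_eq_some d n s hs, rfl⟩

-- the pair-accumulating fold of B is a pair of filters
theorem pair_foldl (local_files remote_files : List (String × Int))
    (ks : List String) (a b : List String) :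
    ks.foldl (fun acc name =>
      if (local_files.map Prod.fst).contains name then
        if dget local_files name ≠ dget remote_files name then (acc.1 ++ [name], acc.2) else acc
      else if (remote_files.map Prod.fst).contains name then (acc.1, acc.2 ++ [name])
      else acc) (a, b)
    = (a ++ ks.filter (fun n => (local_files.map Prod.fst).contains n
            && decide (dget local_files n ≠ dget remote_files n)),
       b ++ ks.filter (fun n => !(local_files.map Prod.fst).contains n
            && (remote_files.map Prod.fst).contains n)) := by
  induction ks generalizing a b with
  | nil => simp
  | cons k rest ih =>
    simp only [List.foldl_cons]
    by_cases h1 : (local_files.map Prod.fst).contains k = true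
    · by_cases h2 : dget local_files k ≠ dget remote_files k
      · rw [if_pos h1, if_pos h2, ih,
            List.filter_cons_of_pos (by rw [h1, decide_eq_true h2]; rfl),
            List.filter_cons_of_neg (by rw [h1]; simp)]
        simp
      · rw [if_pos h1, if_neg h2, ih,
            List.filter_cons_of_neg (by rw [h1, decide_eq_false h2]; simp),
            List.filter_cons_of_neg (by rw [h1]; simp)]
    · have h1f : (local_files.map Prod.fst).contains k = false := by simpa using h1
      rw [if_neg h1]
      by_cases h3 : (remote_files.map Prod.fst).contains k = true
      · rw [if_pos h3, ih,
            List.filter_cons_of_neg (by rw [h1f]; simp),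
            List.filter_cons_of_pos (by rw [h1f, h3]; rfl)]
        simp
      · have h3f : (remote_files.map Prod.fst).contains k = false := by simpa using h3
        rw [if_neg h3, ih,
            List.filter_cons_of_neg (by rw [h1f]; simp),
            List.filter_cons_of_neg (by rw [h1f, h3f]; simp)]

-- ===== VERDICT (by name: the statement is the Claim_ definition above) =====
theorem sync_plan_spec : Claim_equal_sync_plan := by
  intro local_files remote_files _ hpre
  obtain ⟨hL, hR⟩ := hpre
  unfold Spec_sync_plan sync_plan sync_plan_alt
  rw [pair_foldl]
  simp only [List.nil_append]
  have hlt : (PySem.List.sorted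
      (PySem.Set.ofList (local_files.map Prod.fst ++ remote_files.map Prod.fst))
      (fun x => x) false).Pairwise (· < ·) :=
    PySem.List.sorted_ofList_pairwise_lt _
  have hmemk : ∀ n, n ∈ PySem.List.sorted
      (PySem.Set.ofList (local_files.map Prod.fst ++ remote_files.map Prod.fst))
      (fun x => x) false ↔ n ∈ local_files.map Prod.fst ∨ n ∈ remote_files.map Prod.fst := by
    intro n
    rw [PySem.List.mem_sorted, PySem.Set.mem_ofList, List.mem_append]
  rw [Prod.mk.injEq]
  refine ⟨?_, ?_⟩
  · -- upload component
    apply PySem.List.sorted_eq_of_perm_of_pairwise_lt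
    · apply (List.perm_ext_iff_of_nodup ?_ ?_).mpr
      · intro n
        rw [List.mem_filter, hmemk]
        simp only [Bool.and_eq_true]
        constructor
        · rintro ⟨-, hc, hne⟩
          have hmem : n ∈ local_files.map Prod.fst := by simpa using hc
          rcases (mem_keys_iff_dget local_files n).mp hmem with ⟨s, hs⟩
          refine List.mem_map.mpr ⟨(n, s), List.mem_filter.mpr ⟨mem_of_dget_eq_some _ _ _ hs, ?_⟩, rfl⟩
          have : dget local_files n ≠ dget remote_files n := of_decide_eq_true hne
          simp only [decide_eq_true_eq]
          intro h; exact this (by rw [hs, h])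
        · intro hx
          rcases List.mem_map.mp hx with ⟨p, hp, hfst⟩
          rcases List.mem_filter.mp hp with ⟨hpl, hcond⟩
          have hcond' : dget remote_files p.1 ≠ some p.2 := of_decide_eq_true hcond
          have hmem : n ∈ local_files.map Prod.fst := hfst ▸ List.mem_map.mpr ⟨p, hpl, rfl⟩
          refine ⟨Or.inl hmem, by simpa using hmem, ?_⟩
          have hdl : dget local_files p.1 = some p.2 :=
            dget_eq_some_of_mem local_files p.1 p.2 hL (by cases p; exact hpl)
          subst hfst
          simp only [decide_eq_true_eq]
          rw [hdl]; exact fun h => hcond' h.symm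
      · exact ((hlt.sublist List.filter_sublist).imp ne_of_lt)
      · exact hL.sublist (List.filter_sublist.map Prod.fst)
    · exact hlt.sublist List.filter_sublist
  · -- delete component
    apply PySem.List.sorted_eq_of_perm_of_pairwise_lt
    · apply (List.perm_ext_iff_of_nodup ?_ ?_).mpr
      · intro n
        rw [List.mem_filter, hmemk]
        simp only [Bool.and_eq_true, Bool.not_eq_eq_eq_not, Bool.not_true]
        constructor
        · rintro ⟨-, hnc, hc⟩
          have hmemR : n ∈ remote_files.map Prod.fst := by simpa using hc
          rcases List.mem_map.mp hmemR with ⟨p, hp, hfst⟩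
          refine List.mem_map.mpr ⟨p, List.mem_filter.mpr ⟨hp, ?_⟩, hfst⟩
          rw [hfst, hnc]; rfl
        · intro hx
          rcases List.mem_map.mp hx with ⟨p, hp, hfst⟩
          rcases List.mem_filter.mp hp with ⟨hpr, hcond⟩
          have hmemR : n ∈ remote_files.map Prod.fst := hfst ▸ List.mem_map.mpr ⟨p, hpr, rfl⟩
          refine ⟨Or.inr hmemR, ?_, by simpa using hmemR⟩
          rw [← hfst]
          simpa using hcond
      · exact ((hlt.sublist List.filter_sublist).imp ne_of_lt)
      · exact hR.sublist (List.filter_sublist.map Prod.fst)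
    · exact hlt.sublist List.filter_sublist
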